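-- pv_equiv track=rewrite | github.com/marchaesen/vcxsrv | mesalib/src/util/xmlpool/gen_xmlpool.py | escapeCString
-- ===== SOURCE A (Python) =====
-- def escapeCString(s):
--     escapeSeqs = {'\a' : '\\a', '\b' : '\\b', '\f' : '\\f', '\n' : '\\n',
--                   '\r' : '\\r', '\t' : '\\t', '\v' : '\\v', '\\' : '\\\\'}
--     # " -> '' is a hack. Quotes (") aren't possible in XML attributes.
--     # Better use Unicode characters for typographic quotes in option
--     # descriptions and translations.
--     last_quote = '”'
--     i = 0
--     r = ''
--     for c in s:
--         # Special case: escape double quote with “ or ”, depending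
--         # on whether it's an open or close quote. This is needed because plain
--         # double quotes are not possible in XML attributes.
--         if c == '"':
--             if last_quote == '”':
--                 q = '“'
--             else:
--                 q = '”'
--             last_quote = q
--             r = r + q
--         elif c in escapeSeqs:
--             r = r + escapeSeqs[c]
--         else:
--             r = r + c
--     return r
-- ===== SOURCE B (Python) =====
-- def escapeCString(s):
--     escapeSeqs = {'\a' : '\\a', '\b' : '\\b', '\f' : '\\f', '\n' : '\\n',
--                   '\r' : '\\r', '\t' : '\\t', '\v' : '\\v', '\\' : '\\\\'}
--     parts = [''.join(escapeSeqs.get(c, c) for c in p) for p in s.split('"')]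
--     out = [parts[0]]
--     for i, p in enumerate(parts[1:]):
--         out.append('\u201c' if i % 2 == 0 else '\u201d')
--         out.append(p)
--     return ''.join(out)
-- ===== Notes on version B (the rewrite author's own statement) =====
-- stated objective: alternative
-- what changed: B replaces A's single char-by-char pass with a mutable last_quote flag by splitting the input on the double-quote character, escaping each quote-free part independently through the dict, and rejoining the parts with alternating typographic quotes determined by position parity.
import Mathlib
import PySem

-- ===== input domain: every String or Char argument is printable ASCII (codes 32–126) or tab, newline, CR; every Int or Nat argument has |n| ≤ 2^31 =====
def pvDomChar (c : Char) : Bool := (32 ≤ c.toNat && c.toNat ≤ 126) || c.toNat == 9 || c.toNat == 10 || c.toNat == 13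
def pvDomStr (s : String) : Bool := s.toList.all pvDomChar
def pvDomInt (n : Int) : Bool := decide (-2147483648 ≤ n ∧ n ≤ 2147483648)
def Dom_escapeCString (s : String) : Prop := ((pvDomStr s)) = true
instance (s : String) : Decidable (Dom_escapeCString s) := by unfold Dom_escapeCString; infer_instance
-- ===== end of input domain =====

-- B escapes the same string by splitting on '"', escaping each quote-free part
-- through the dict, and rejoining with alternating typographic quotes
-- (objective: alternative decomposition, no speed claim).

-- ===== PORT A =====
-- the escapeSeqs dict literal both Pythons define
def pvEscapeSeqs : PySem.Dict Char (List Char) :=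
  PySem.Dict.mk [('\x07', ['\\', 'a']), ('\x08', ['\\', 'b']), ('\x0c', ['\\', 'f']),
                 ('\n', ['\\', 'n']), ('\r', ['\\', 'r']), ('\t', ['\\', 't']),
                 ('\x0b', ['\\', 'v']), ('\\', ['\\', '\\'])]

-- A's for-loop: state = (last_quote, r), one character at a time
def escapeALoop (lq : Char) (r : List Char) : List Char → List Char
  | [] => r
  | c :: cs =>
    if c = '"' then
      let q := if lq = '”' then '“' else '”'
      escapeALoop q (r ++ [q]) cs
    else if pvEscapeSeqs.contains c then
      escapeALoop lq (r ++ pvEscapeSeqs.getD c []) cs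
    else
      escapeALoop lq (r ++ [c]) cs

def escapeCString (s : String) : String := String.ofList (escapeALoop '”' [] s.toList)

-- ===== PORT B =====
-- escapeSeqs.get(c, c) for one character
def escBChar (c : Char) : List Char := (pvEscapeSeqs.get? c).getD [c]

-- ''.join(escapeSeqs.get(c, c) for c in p)
def escBPart (p : List Char) : List Char := p.flatMap escBChar

-- the for i, p in enumerate(parts[1:]) loop: quote of parity i, then the part
def escBJoinTail (i : Nat) : List (List Char) → List Char
  | [] => []
  | p :: rest => (if i % 2 = 0 then ['“'] else ['”']) ++ p ++ escBJoinTail (i + 1) rest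

def escapeCString_alt (s : String) : String :=
  let parts := (s.toList.splitOn '"').map escBPart   -- s.split('"'), each part escaped
  match parts with
  | [] => ""
  | p :: rest => String.ofList (p ++ escBJoinTail 0 rest)

-- ===== PRECONDITION & SPEC =====
def Spec_escapeCString (s : String) (out : String) : Prop := out = escapeCString_alt s
instance (s : String) (out : String) : Decidable (Spec_escapeCString s out) := by unfold Spec_escapeCString; infer_instance

-- ===== CLAIM (what is proved, stated in full; the proofs are below) =====
def Claim_equal_escapeCString : Prop := ∀ (s : String), Dom_escapeCString s → Spec_escapeCString s (escapeCString s)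

-- ===== LEMMAS AND PROOFS =====

theorem pv_any_eq_find?_isSome (l : List (Char × List Char)) (c : Char) :
    (l.any fun p => p.1 == c) = (List.find? (fun p => p.1 == c) l).isSome := by
  induction l with
  | nil => simp
  | cons p t ih =>
    by_cases h : p.1 == c
    · simp [h]
    · simp only [List.any_cons, List.find?_cons]
      simp [h, ih]

-- A's guarded dict lookup is B's get-with-default
theorem pv_branch_eq_escBChar (c : Char) :
    (if pvEscapeSeqs.contains c then pvEscapeSeqs.getD c [] else [c]) = escBChar c := by
  have hc : pvEscapeSeqs.contains c = (pvEscapeSeqs.get? c).isSome := by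
    simp only [PySem.Dict.contains, PySem.Dict.get?, Option.isSome_map]
    exact pv_any_eq_find?_isSome _ c
  cases h : pvEscapeSeqs.get? c with
  | none => simp [escBChar, hc, h]
  | some v => simp [escBChar, PySem.Dict.getD, hc, h]

-- the loop invariant: A's pass over cs produces B's split/escape/rejoin,
-- with the parity of i encoding last_quote
theorem escapeALoop_eq (cs : List Char) : ∀ (i : Nat) (r : List Char),
    escapeALoop (if i % 2 = 0 then '”' else '“') r cs
      = r ++ escBPart (cs.splitOn '"').headI
          ++ escBJoinTail i ((cs.splitOn '"').tail.map escBPart) := by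
  induction cs with
  | nil => intro i r; simp [List.splitOn_nil, escapeALoop, escBPart, escBJoinTail]
  | cons c cs ih =>
    intro i r
    by_cases hq : c = '"'
    · subst hq
      have hsplit : (('"' :: cs).splitOn '"') = [] :: cs.splitOn '"' := by
        simp [List.splitOn, List.splitOnP_cons]
      obtain ⟨p, rest, hpr⟩ : ∃ p rest, cs.splitOn '"' = p :: rest := by
        cases h : cs.splitOn '"' with
        | nil => exact absurd h (List.splitOnP_ne_nil _ _)
        | cons p rest => exact ⟨p, rest, rfl⟩
      have hstep : escapeALoop (if i % 2 = 0 then '”' else '“') r ('"' :: cs)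
          = escapeALoop (if (i + 1) % 2 = 0 then '”' else '“')
              (r ++ [if i % 2 = 0 then '“' else '”']) cs := by
        rcases Nat.even_or_odd i with he | ho
        · have h0 : i % 2 = 0 := Nat.even_iff.mp he
          have h1 : (i + 1) % 2 = 1 := by omega
          simp [escapeALoop, h0, h1]
        · have h0 : i % 2 = 1 := Nat.odd_iff.mp ho
          have h1 : (i + 1) % 2 = 0 := by omega
          simp [escapeALoop, h0, h1]
      rw [hstep, ih (i + 1), hsplit, hpr]
      simp only [List.headI, List.tail, List.map_cons, escBJoinTail, escBPart, List.append_assoc,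
        List.singleton_append]
      split <;> simp
    · have hsplit : ((c :: cs).splitOn '"')
          = (cs.splitOn '"').modifyHead (List.cons c) := by
        simp [List.splitOn, List.splitOnP_cons, hq]
      obtain ⟨p, rest, hpr⟩ : ∃ p rest, cs.splitOn '"' = p :: rest := by
        cases h : cs.splitOn '"' with
        | nil => exact absurd h (List.splitOnP_ne_nil _ _)
        | cons p rest => exact ⟨p, rest, rfl⟩
      have hstep : escapeALoop (if i % 2 = 0 then '”' else '“') r (c :: cs)
          = escapeALoop (if i % 2 = 0 then '”' else '“') (r ++ escBChar c) cs := by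
        have hne : ¬ c = '"' := hq
        rw [← pv_branch_eq_escBChar c]
        by_cases hmem : pvEscapeSeqs.contains c
        · simp [escapeALoop, hne, hmem]
        · simp [escapeALoop, hne, hmem]
      rw [hstep, ih i, hsplit, hpr]
      simp [escBPart, escBChar]

-- ===== VERDICT (by name: the statement is the Claim_ definition above) =====
theorem escapeCString_spec : Claim_equal_escapeCString := by
  intro s _
  show escapeCString s = escapeCString_alt s
  obtain ⟨p, rest, hpr⟩ : ∃ p rest, s.toList.splitOn '"' = p :: rest := by
    cases h : s.toList.splitOn '"' with
    | nil => exact absurd h (List.splitOnP_ne_nil _ _)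
    | cons p rest => exact ⟨p, rest, rfl⟩
  have h0 : escapeALoop '”' [] s.toList
      = escBPart p ++ escBJoinTail 0 (List.map escBPart rest) := by
    have h := escapeALoop_eq s.toList 0 []
    simpa [hpr] using h
  unfold escapeCString escapeCString_alt
  rw [hpr]
  simp [h0]
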